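-- pv_equiv track=rewrite | github.com/barasamit/QuantAttack | utils/losses_utils.py | filter_items_by_pointer
-- ===== SOURCE A (Python) =====
-- def filter_items_by_pointer(items, pointers, mode="filter"):
--     unique_items = {}
--     if mode == "filter":
--         for item, pointer in zip(items, pointers):
--             unique_items[pointer] = item
--     else:
--         for item, pointer in zip(items, pointers):
--             if pointer in unique_items:
--                 unique_items[pointer] += item
--             else:
--                 unique_items[pointer] = item
--     return list(unique_items.values())
-- ===== SOURCE B (Python) =====
-- def filter_items_by_pointer(items, pointers, mode="filter"):
--     groups = {}
--     for item, pointer in zip(items, pointers):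
--         groups.setdefault(pointer, []).append(item)
--     if mode == "filter":
--         return [lst[-1] for lst in groups.values()]
--     return [sum(lst) for lst in groups.values()]
-- ===== Notes on version B (the rewrite author's own statement) =====
-- stated objective: alternative
-- what changed: Instead of A's per-mode dict loops that collapse on the fly, B makes one mode-independent grouping pass (pointer -> list of its items in order) and then collapses each group in a second pass (last element for 'filter', sum otherwise).
import Mathlib
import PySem

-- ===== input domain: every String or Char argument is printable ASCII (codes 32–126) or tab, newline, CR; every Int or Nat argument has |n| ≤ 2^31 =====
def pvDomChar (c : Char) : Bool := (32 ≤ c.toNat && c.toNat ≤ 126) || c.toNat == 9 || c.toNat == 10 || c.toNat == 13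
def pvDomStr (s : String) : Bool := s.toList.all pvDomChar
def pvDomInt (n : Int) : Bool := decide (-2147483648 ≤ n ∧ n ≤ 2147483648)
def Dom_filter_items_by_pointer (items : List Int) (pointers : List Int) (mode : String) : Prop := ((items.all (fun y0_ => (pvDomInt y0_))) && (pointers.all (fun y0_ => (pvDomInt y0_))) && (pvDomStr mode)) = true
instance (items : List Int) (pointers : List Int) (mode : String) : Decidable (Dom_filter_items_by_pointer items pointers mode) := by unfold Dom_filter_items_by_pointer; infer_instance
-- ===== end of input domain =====

-- B groups items per pointer in one mode-independent pass and collapses each group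
-- (last element / sum) in a second pass, instead of A's per-mode collapsing dict loops.

-- ===== PORT A =====
def filter_items_by_pointer (items : List Int) (pointers : List Int) (mode : String) : List Int :=
  let unique_items : PySem.Dict Int Int :=
    if mode == "filter" then
      (items.zip pointers).foldl (fun d pr => d.insert pr.2 pr.1) PySem.Dict.empty
    else
      (items.zip pointers).foldl (fun d pr =>
        if d.contains pr.2 then d.insert pr.2 (d.getD pr.2 0 + pr.1)
        else d.insert pr.2 pr.1) PySem.Dict.empty
  unique_items.values

-- ===== PORT B =====
def filter_items_by_pointer_alt (items : List Int) (pointers : List Int) (mode : String) : List Int :=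
  let groups : PySem.Dict Int (List Int) :=
    (items.zip pointers).foldl (fun g pr => g.modify pr.2 [] (fun l => l ++ [pr.1])) PySem.Dict.empty
  if mode == "filter" then
    groups.values.map (fun lst => PySem.List.pyGetD lst (-1) 0)
  else
    groups.values.map (fun lst => lst.sum)

-- ===== PRECONDITION & SPEC =====
def Spec_filter_items_by_pointer (items : List Int) (pointers : List Int) (mode : String) (out : List Int) : Prop := out = filter_items_by_pointer_alt items pointers mode
instance (items : List Int) (pointers : List Int) (mode : String) (out : List Int) : Decidable (Spec_filter_items_by_pointer items pointers mode out) := by unfold Spec_filter_items_by_pointer; infer_instance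

-- ===== CLAIM (what is proved, stated in full; the proofs are below) =====
def Claim_equal_filter_items_by_pointer : Prop := ∀ (items : List Int) (pointers : List Int) (mode : String), Dom_filter_items_by_pointer items pointers mode → Spec_filter_items_by_pointer items pointers mode (filter_items_by_pointer items pointers mode)

-- ===== LEMMAS AND PROOFS =====

-- the items recorded for pointer k, in encounter order
def pvItemsFor (zs : List (Int × Int)) (k : Int) : List Int :=
  (zs.filter (fun pr => pr.2 == k)).map (·.1)

theorem pvGroups_getD (zs : List (Int × Int)) (k : Int) :
    ∀ g : PySem.Dict Int (List Int),
      (zs.foldl (fun g pr => g.modify pr.2 [] (fun l => l ++ [pr.1])) g).getD k [] =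
        g.getD k [] ++ pvItemsFor zs k := by
  induction zs with
  | nil => intro g; simp [pvItemsFor]
  | cons pr zs ih =>
    intro g
    simp only [List.foldl_cons, ih, pvItemsFor, List.filter_cons]
    by_cases h : pr.2 = k
    · subst h; simp
    · simp [h, PySem.Dict.getD_modify, Ne.symm h]

theorem pvA1_getD (zs : List (Int × Int)) (k : Int) :
    ∀ d : PySem.Dict Int Int,
      (zs.foldl (fun d pr => d.insert pr.2 pr.1) d).getD k 0 =
        (pvItemsFor zs k).foldl (fun _ x => x) (d.getD k 0) := by
  induction zs with
  | nil => intro d; simp [pvItemsFor]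
  | cons pr zs ih =>
    intro d
    simp only [List.foldl_cons, ih, pvItemsFor, List.filter_cons]
    by_cases h : pr.2 = k
    · simp [h]
    · simp [h, PySem.Dict.getD_insert, Ne.symm h]

theorem pvA2_getD (zs : List (Int × Int)) (k : Int) :
    ∀ d : PySem.Dict Int Int,
      (zs.foldl (fun d pr =>
        if d.contains pr.2 then d.insert pr.2 (d.getD pr.2 0 + pr.1)
        else d.insert pr.2 pr.1) d).getD k 0 = d.getD k 0 + (pvItemsFor zs k).sum := by
  induction zs with
  | nil => intro d; simp [pvItemsFor]
  | cons pr zs ih =>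
    intro d
    have hstep : (if d.contains pr.2 then d.insert pr.2 (d.getD pr.2 0 + pr.1)
        else d.insert pr.2 pr.1) = d.insert pr.2 (d.getD pr.2 0 + pr.1) := by
      by_cases hc : d.contains pr.2
      · simp [hc]
      · simp [hc, PySem.Dict.getD_of_not_contains _ _ (by simpa using hc)]
    simp only [List.foldl_cons, hstep, ih, pvItemsFor, List.filter_cons]
    by_cases h : pr.2 = k
    · subst h; simp [PySem.Dict.getD_insert]; ring
    · simp [h, PySem.Dict.getD_insert, Ne.symm h]

theorem pvLastFold (t : List Int) : ∀ a : Int, t.foldl (fun _ x => x) a = t.getLast?.getD a := by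
  induction t with
  | nil => intro a; rfl
  | cons b t ih => intro a; simp [ih b, List.getLast?_cons]

-- ===== VERDICT (by name: the statement is the Claim_ definition above) =====
theorem filter_items_by_pointer_spec : Claim_equal_filter_items_by_pointer := by
  intro items pointers mode _
  unfold Spec_filter_items_by_pointer filter_items_by_pointer filter_items_by_pointer_alt
  set zs := items.zip pointers with hzs
  have hgk : ((zs.foldl (fun g pr => g.modify pr.2 [] (fun l => l ++ [pr.1])) (PySem.Dict.empty : PySem.Dict Int (List Int)))).keys
      = PySem.Set.ofList (zs.map (·.2)) := by
    rw [PySem.Dict.keys_foldl_modify_key]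
    simp [PySem.Dict.keys_empty, PySem.Set.update_nil_left]
  have hgn : ((zs.foldl (fun g pr => g.modify pr.2 [] (fun l => l ++ [pr.1])) (PySem.Dict.empty : PySem.Dict Int (List Int)))).keys.Nodup :=
    PySem.Dict.nodup_keys_foldl_modify_key zs _ _ _ _ (by simp [PySem.Dict.keys_empty])
  have hgv : ((zs.foldl (fun g pr => g.modify pr.2 [] (fun l => l ++ [pr.1])) (PySem.Dict.empty : PySem.Dict Int (List Int)))).values
      = (PySem.Set.ofList (zs.map (·.2))).map (fun k => pvItemsFor zs k) := by
    rw [PySem.Dict.values_eq_map_keys _ hgn [], hgk]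
    refine List.map_congr_left fun k _ => ?_
    simpa using pvGroups_getD zs k PySem.Dict.empty
  have hLne : ∀ k ∈ PySem.Set.ofList (zs.map (·.2)), pvItemsFor zs k ≠ [] := by
    intro k hk
    rw [PySem.Set.mem_ofList] at hk
    obtain ⟨pr, hpr, hk⟩ := List.mem_map.mp hk
    simp only [pvItemsFor, ne_eq, List.map_eq_nil_iff, List.filter_eq_nil_iff, not_forall]
    exact ⟨pr, hpr, by simp [hk]⟩
  by_cases hm : mode == "filter"
  · simp only [hm, if_pos, hgv, List.map_map]
    rw [PySem.Dict.values_eq_map_keys _ (PySem.Dict.nodup_keys_foldl_insert_key zs _ _ _ (by simp [PySem.Dict.keys_empty])) 0]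
    rw [PySem.Dict.keys_foldl_insert_key]
    simp only [PySem.Dict.keys_empty, PySem.Set.update_nil_left]
    refine List.map_congr_left fun k hk => ?_
    have h1 := pvA1_getD zs k PySem.Dict.empty
    have hne := hLne k hk
    simp only [PySem.Dict.getD_empty] at h1
    rw [h1, pvLastFold, Function.comp_apply, PySem.List.pyGetD_neg_one _ _ hne,
      List.getLast?_eq_some_getLast hne]
    rfl
  · have hfe : (fun (d : PySem.Dict Int Int) (pr : Int × Int) =>
        if d.contains pr.2 then d.insert pr.2 (d.getD pr.2 0 + pr.1) else d.insert pr.2 pr.1)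
        = fun d pr => d.insert pr.2 (if d.contains pr.2 then d.getD pr.2 0 + pr.1 else pr.1) := by
      funext d pr; by_cases hc : d.contains pr.2 <;> simp [hc]
    simp only [hm, Bool.false_eq_true, if_false, hgv, List.map_map, hfe]
    rw [PySem.Dict.values_eq_map_keys _ (PySem.Dict.nodup_keys_foldl_insert_key zs (·.2)
      _ _ (by simp [PySem.Dict.keys_empty])) 0]
    rw [PySem.Dict.keys_foldl_insert_key]
    simp only [PySem.Dict.keys_empty, PySem.Set.update_nil_left]
    refine List.map_congr_left fun k hk => ?_
    have h2 := pvA2_getD zs k PySem.Dict.empty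
    rw [hfe] at h2
    simp only [PySem.Dict.getD_empty, zero_add] at h2
    rw [h2]
    rfl
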